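-- pv_equiv track=rewrite | github.com/bouzidkobchi/Oops | 3 - Oops!/test.py | unrandomizer
-- ===== SOURCE A (Python) =====
-- def unrandomizer(text) :
--     """reversing the randomized text algorithme"""
--     text_list = [*text]
--
--     _to = len(text_list)//2 + 1
--     _from = len(text_list)//2
--
--     # unrandomize :
--     for i in range(_to-1) :
--         for j in range(_from,_to,2) :
--             # swap :
--             t = text_list[j]
--             text_list[j] = text_list[j-1]
--             text_list[j-1] = t
--
--         _to += 1
--         _from -= 1
--
--     new_text = ''.join(text_list)
--
--     return new_text
-- ===== SOURCE B (Python) =====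
-- def unrandomizer(text):
--     """reversing the randomized text algorithme"""
--     half = len(text) // 2
--     out = []
--     for b, f in zip(text[half:], text[:half]):
--         out += [b, f]
--     if len(text) % 2:
--         out.append(text[-1])
--     return ''.join(out)
-- ===== Notes on version B (the rewrite author's own statement) =====
-- stated objective: faster
-- what changed: Replaced the quadratic nested adjacent-swap loops by a single O(n) pass that interleaves the second half of the string with the first half (appending the middle character of an odd-length string last).
import Mathlib
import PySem

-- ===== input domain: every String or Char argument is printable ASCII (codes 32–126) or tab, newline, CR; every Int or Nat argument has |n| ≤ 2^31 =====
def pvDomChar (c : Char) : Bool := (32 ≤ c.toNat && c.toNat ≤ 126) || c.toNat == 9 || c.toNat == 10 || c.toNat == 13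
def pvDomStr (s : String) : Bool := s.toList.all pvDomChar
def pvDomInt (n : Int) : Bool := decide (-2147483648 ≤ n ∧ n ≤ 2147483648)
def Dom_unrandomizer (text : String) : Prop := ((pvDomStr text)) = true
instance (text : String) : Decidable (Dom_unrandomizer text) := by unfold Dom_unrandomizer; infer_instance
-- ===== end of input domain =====

-- B replaces A's quadratic nested adjacent-swap loops by one linear pass interleaving
-- the second half of the string with the first half (middle char of odd input appended last).


-- ===== PORT A =====
-- one Python inner-loop body: t = l[j]; l[j] = l[j-1]; l[j-1] = t
-- (total via pyGetD/pySetD; every reachable call has both indices in range, so this is exact)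
def pvSwapStep (l : List Char) (j : Int) : List Char :=
  let t := PySem.List.pyGetD l j ' '
  let l1 := PySem.List.pySetD l j (PySem.List.pyGetD l (j - 1) ' ')
  PySem.List.pySetD l1 (j - 1) t

-- one iteration of A's outer loop on the state (text_list, _to, _from)
def pvOuterStep (s : List Char × Int × Int) (_i : Int) : List Char × Int × Int :=
  ((PySem.List.pyRange s.2.2 s.2.1 2).foldl pvSwapStep s.1, s.2.1 + 1, s.2.2 - 1)

def unrandomizer (text : String) : String :=
  let textList := text.toList
  let to0 : Int := PySem.Int.floordiv (textList.length : Int) 2 + 1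
  let from0 : Int := PySem.Int.floordiv (textList.length : Int) 2
  let s := (PySem.List.pyRange 0 (to0 - 1) 1).foldl pvOuterStep (textList, to0, from0)
  String.ofList s.1

-- ===== PORT B =====
def unrandomizer_alt (text : String) : String :=
  let tl := text.toList
  let half := tl.length / 2
  let out := ((PySem.List.slice tl (some (half : Int)) none).zip
              (PySem.List.slice tl none (some (half : Int)))).foldl
    (fun acc p => acc ++ [p.1, p.2]) ([] : List Char)
  let out := if tl.length % 2 = 1 then out ++ [PySem.List.pyGetD tl (-1) ' '] else out
  String.ofList out

-- ===== PRECONDITION & SPEC =====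
def Spec_unrandomizer (text : String) (out : String) : Prop := out = unrandomizer_alt text
instance (text : String) (out : String) : Decidable (Spec_unrandomizer text out) := by unfold Spec_unrandomizer; infer_instance

-- ===== CLAIM (what is proved, stated in full; the proofs are below) =====
def Claim_equal_unrandomizer : Prop := ∀ (text : String), Dom_unrandomizer text → Spec_unrandomizer text (unrandomizer text)

-- ===== LEMMAS AND PROOFS =====

-- interleave two lists, first-list element first; stops at the shorter list
def pvIlv : List Char → List Char → List Char
  | b :: bs, f :: fs => b :: f :: pvIlv bs fs
  | _, _ => []

theorem pvIlv_nil_left (Q : List Char) : pvIlv [] Q = [] := by cases Q <;> rfl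

theorem pvIlv_nil_right (X : List Char) : pvIlv X [] = [] := by cases X <;> rfl

-- a Python range with step 2 of odd span is an arithmetic map
theorem pvRange_two (fr b : Int) (m : Nat) (hb : b = fr + (2 * m + 1)) :
    PySem.List.pyRange fr b 2 = (List.range (m + 1)).map (fun k : Nat => fr + 2 * (k : Int)) := by
  subst hb
  rw [PySem.List.pyRange_of_pos _ _ (by norm_num)]
  rw [if_pos (by omega)]
  have h1 : (fr + (2 * (m : Int) + 1) - fr + 2 - 1) = 2 * (m : Int) + 2 := by ring
  rw [h1]
  have h2 : ((2 * (m : Int) + 2) / 2).toNat = m + 1 := by omega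
  rw [h2]

-- one swap of A at position |P|+1 exchanges the two elements after P
theorem pvSwap_at (P : List Char) (a b : Char) (R : List Char) :
    pvSwapStep (P ++ a :: b :: R) ((P.length : Int) + 1) = P ++ b :: a :: R := by
  have hc1 : ((P.length : Int) + 1) = ((P.length + 1 : Nat) : Int) := by push_cast; ring
  have hc0 : (((P.length + 1 : Nat) : Int) - 1) = ((P.length : Nat) : Int) := by push_cast; ring
  simp only [pvSwapStep, hc1, hc0, PySem.List.pyGetD_natCast, PySem.List.pySetD_natCast]
  have hgb : (P ++ a :: b :: R).getD (P.length + 1) ' ' = b := by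
    rw [List.getD_append_right _ _ _ _ (by omega)]
    simp
  have hga : (P ++ a :: b :: R).getD P.length ' ' = a := by
    rw [List.getD_append_right _ _ _ _ (by omega)]
    simp
  rw [hgb, hga]
  rw [List.set_append, if_neg (by omega)]
  have hd : P.length + 1 - P.length = 1 := by omega
  rw [hd]
  rw [List.set_append, if_neg (by omega)]
  simp

-- A's inner loop on P ++ x :: pvIlv X Q ++ r :: R (with |X| = |Q|, |X|+1 swaps starting
-- at |P|+1, step 2) pushes x and r into the interleaved segment
theorem pvInner (X : List Char) : ∀ (Q P : List Char) (x r : Char) (R : List Char),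
    X.length = Q.length →
    ((List.range (X.length + 1)).map (fun k : Nat => ((P.length : Int) + 1) + 2 * (k : Int))).foldl
        pvSwapStep (P ++ x :: (pvIlv X Q ++ r :: R))
      = P ++ (pvIlv (X ++ [r]) (x :: Q) ++ R) := by
  induction X with
  | nil =>
    intro Q P x r R hlen
    have hQ : Q = [] := List.eq_nil_of_length_eq_zero hlen.symm
    subst hQ
    simp only [pvIlv_nil_left, List.nil_append, List.length_nil]
    have hlst : (List.range (0 + 1)).map (fun k : Nat => ((P.length : Int) + 1) + 2 * (k : Int))
        = [(P.length : Int) + 1] := by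
      simp
    rw [hlst, List.foldl_cons, List.foldl_nil, pvSwap_at]
    rfl
  | cons b X' ih =>
    intro Q P x r R hlen
    cases Q with
    | nil => simp at hlen
    | cons q Q' =>
      have hlen' : X'.length = Q'.length := by simpa using hlen
      have hlst : (List.range ((b :: X').length + 1)).map
            (fun k : Nat => ((P.length : Int) + 1) + 2 * (k : Int))
          = ((P.length : Int) + 1) :: (List.range (X'.length + 1)).map
              (fun k : Nat => (((P ++ [b, x]).length : Int) + 1) + 2 * (k : Int)) := by
        rw [List.length_cons, List.range_succ_eq_map, List.map_cons, List.map_map]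
        refine List.cons_eq_cons.mpr ⟨by push_cast; ring, ?_⟩
        exact List.map_congr_left (fun k _ => by
          simp only [Function.comp, Nat.succ_eq_add_one, List.length_append,
            List.length_cons, List.length_nil]
          push_cast; ring)
      have hl1 : P ++ x :: (pvIlv (b :: X') (q :: Q') ++ r :: R)
          = P ++ x :: b :: (q :: (pvIlv X' Q' ++ r :: R)) := by
        simp [pvIlv]
      rw [hlst, List.foldl_cons, hl1, pvSwap_at]
      have hP2 : P ++ b :: x :: (q :: (pvIlv X' Q' ++ r :: R))
          = (P ++ [b, x]) ++ q :: (pvIlv X' Q' ++ r :: R) := by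
        simp
      rw [hP2, ih Q' (P ++ [b, x]) q r R hlen']
      simp [pvIlv]

-- the list after i iterations of A's outer loop
def pvL (tl : List Char) (h i : Nat) : List Char :=
  (tl.take h).take (h - i) ++ pvIlv ((tl.drop h).take i) ((tl.take h).drop (h - i))
    ++ (tl.drop h).drop i

-- invariant of A's outer loop
theorem pvOuter (tl : List Char) (h : Nat) (hh : h = tl.length / 2) :
    ∀ i : Nat, i ≤ h →
    (PySem.List.pyRange 0 (i : Int) 1).foldl pvOuterStep (tl, (h : Int) + 1, (h : Int))
      = (pvL tl h i, (h : Int) + 1 + i, (h : Int) - i) := by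
  intro i
  induction i with
  | zero =>
    intro _
    rw [PySem.List.pyRange_one_eq_nil (by norm_num)]
    simp [pvL, pvIlv_nil_left, List.take_take]
  | succ i ih =>
    intro hi
    have hi' : i ≤ h := by omega
    have hcast : ((i + 1 : Nat) : Int) = (i : Int) + 1 := by push_cast; ring
    rw [hcast, PySem.List.pyRange_one_succ_right (by positivity), List.foldl_append,
      ih hi', List.foldl_cons, List.foldl_nil]
    unfold pvOuterStep
    have hF : (tl.take h).length = h := by
      rw [List.length_take]; omega
    have hBh : h ≤ (tl.drop h).length := by
      rw [List.length_drop]; omega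
    have hix : h - i - 1 < (tl.take h).length := by omega
    have hiB : i < (tl.drop h).length := by omega
    have hsplitF : (tl.take h).take (h - i)
        = (tl.take h).take (h - i - 1) ++ [(tl.take h)[h - i - 1]] := by
      have hdc := List.take_add_one (l := tl.take h) (i := h - i - 1)
      rw [List.getElem?_eq_getElem hix] at hdc
      rw [show h - i - 1 + 1 = h - i from by omega] at hdc
      exact hdc
    have hsplitB : (tl.drop h).drop i = (tl.drop h)[i] :: (tl.drop h).drop (i + 1) :=
      List.drop_eq_getElem_cons hiB
    have hlX : ((tl.drop h).take i).length = i := by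
      rw [List.length_take]; omega
    have hlQ : ((tl.take h).drop (h - i)).length = i := by
      rw [List.length_drop]; omega
    have hlP : ((tl.take h).take (h - i - 1)).length = h - i - 1 := by
      rw [List.length_take]; omega
    have hfr : ((h : Int) - (i : Int))
        = ((((tl.take h).take (h - i - 1)).length : Int) + 1) := by
      rw [hlP]; omega
    have hrange : PySem.List.pyRange ((h : Int) - (i : Int)) ((h : Int) + 1 + (i : Int)) 2
        = (List.range (((tl.drop h).take i).length + 1)).map
            (fun k : Nat => ((((tl.take h).take (h - i - 1)).length : Int) + 1) + 2 * (k : Int)) := by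
      rw [pvRange_two _ _ i (by omega), hlX, hfr]
    have hlist : pvL tl h i
        = (tl.take h).take (h - i - 1) ++ (tl.take h)[h - i - 1]
            :: (pvIlv ((tl.drop h).take i) ((tl.take h).drop (h - i))
                ++ (tl.drop h)[i] :: (tl.drop h).drop (i + 1)) := by
      unfold pvL
      rw [hsplitF, hsplitB]
      simp
    rw [hlist, hrange, pvInner _ _ _ _ _ _ (by rw [hlX, hlQ])]
    have houtL : (tl.take h).take (h - i - 1)
          ++ (pvIlv ((tl.drop h).take i ++ [(tl.drop h)[i]])
              ((tl.take h)[h - i - 1] :: (tl.take h).drop (h - i))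
            ++ (tl.drop h).drop (i + 1))
        = pvL tl h (i + 1) := by
      unfold pvL
      have h1 : (tl.drop h).take i ++ [(tl.drop h)[i]] = (tl.drop h).take (i + 1) := by
        rw [List.take_add_one, List.getElem?_eq_getElem hiB]
        rfl
      have h2 : (tl.take h)[h - i - 1] :: (tl.take h).drop (h - i)
          = (tl.take h).drop (h - i - 1) := by
        have hdc := List.drop_eq_getElem_cons hix
        rw [show h - i - 1 + 1 = h - i from by omega] at hdc
        exact hdc.symm
      have h3 : h - (i + 1) = h - i - 1 := by omega
      rw [h1, h2, h3, List.append_assoc]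
    rw [houtL]
    exact Prod.ext rfl (Prod.ext (by push_cast; ring) (by push_cast; ring))

-- B's fold over the zip builds the interleaving
theorem pvFlatZip (X : List Char) : ∀ (Q acc : List Char),
    (X.zip Q).foldl (fun acc p => acc ++ [p.1, p.2]) acc
      = acc ++ pvIlv (X.take Q.length) Q := by
  induction X with
  | nil => intro Q acc; simp [pvIlv_nil_left]
  | cons b X' ih =>
    intro Q acc
    cases Q with
    | nil => simp [pvIlv_nil_right]
    | cons q Q' =>
      simp only [List.zip_cons_cons, List.foldl_cons, List.length_cons, List.take_succ_cons]
      rw [ih Q' (acc ++ [b, q])]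
      simp [pvIlv]

-- the main equality on the underlying character list
theorem pvMain (tl : List Char) :
    ((PySem.List.pyRange 0
        ((PySem.Int.floordiv (tl.length : Int) 2 + 1) - 1) 1).foldl pvOuterStep
      (tl, PySem.Int.floordiv (tl.length : Int) 2 + 1,
        PySem.Int.floordiv (tl.length : Int) 2)).1
    = (if tl.length % 2 = 1 then
        ((tl.drop (tl.length / 2)).zip (tl.take (tl.length / 2))).foldl
          (fun acc p => acc ++ [p.1, p.2]) [] ++ [PySem.List.pyGetD tl (-1) ' ']
      else
        ((tl.drop (tl.length / 2)).zip (tl.take (tl.length / 2))).foldl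
          (fun acc p => acc ++ [p.1, p.2]) []) := by
  have hfd : PySem.Int.floordiv (tl.length : Int) 2 = ((tl.length / 2 : Nat) : Int) := by
    exact_mod_cast PySem.Int.floordiv_natCast tl.length 2
  set h := tl.length / 2 with hh
  have hto : (PySem.Int.floordiv (tl.length : Int) 2 + 1) - 1 = (h : Int) := by rw [hfd]; ring
  have hto2 : PySem.Int.floordiv (tl.length : Int) 2 + 1 = (h : Int) + 1 := by rw [hfd]
  rw [hto, hto2, hfd, pvOuter tl h hh h (le_refl h)]
  have hF : (tl.take h).length = h := by rw [List.length_take]; omega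
  have hL : pvL tl h h
      = pvIlv ((tl.drop h).take h) (tl.take h) ++ (tl.drop h).drop h := by
    unfold pvL
    simp
  show pvL tl h h = _
  rw [hL, pvFlatZip, hF]
  simp only [List.nil_append]
  rw [List.drop_drop]
  rcases Nat.mod_two_eq_zero_or_one tl.length with he | ho
  · have hmod : ¬ tl.length % 2 = 1 := by omega
    rw [if_neg hmod, show List.drop (h + h) tl = [] from List.drop_eq_nil_of_le (by omega)]
    simp
  · have h2 : tl.length = h + h + 1 := by omega
    have hmod : tl.length % 2 = 1 := by omega
    rw [if_pos hmod]
    have hne : tl ≠ [] := by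
      intro hc
      rw [hc] at h2
      simp at h2
    have hlt : h + h < tl.length := by omega
    have hdc := List.drop_eq_getElem_cons hlt
    rw [show List.drop (h + h + 1) tl = [] from List.drop_eq_nil_of_le (by omega)] at hdc
    rw [hdc, PySem.List.pyGetD_neg_one tl ' ' hne, List.getLast_eq_getElem]
    have hidx : tl.length - 1 = h + h := by omega
    simp [hidx]

-- ===== VERDICT (by name: the statement is the Claim_ definition above) =====
theorem unrandomizer_spec : Claim_equal_unrandomizer := by
  intro text _
  unfold Spec_unrandomizer unrandomizer unrandomizer_alt
  simp only [PySem.List.slice_from_natCast, PySem.List.slice_to_natCast]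
  rw [pvMain]
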